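-- pv_equiv track=rewrite | github.com/JetBrains/intellij-community | python/helpers/pycharm_generator_utils/util_methods.py | format_accessors
-- ===== SOURCE A (Python) =====
-- def format_accessors(accessor_line, getter, setter, deleter):
--     """Nicely format accessors, like 'getter, fdel=deleter'"""
--     ret = []
--     consecutive = True
--     for key, arg, par in (('r', 'fget', getter), ('w', 'fset', setter), ('d', 'fdel', deleter)):
--         if key in accessor_line:
--             if consecutive:
--                 ret.append(par)
--             else:
--                 ret.append(arg + "=" + par)
--         else:
--             consecutive = False
--     return ", ".join(ret)
-- ===== SOURCE B (Python) =====
-- def format_accessors(accessor_line, getter, setter, deleter):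
--     """Nicely format accessors, like 'getter, fdel=deleter'"""
--     pattern = ''.join(k for k in 'rwd' if k in accessor_line)
--     return {
--         '': '',
--         'r': getter,
--         'w': 'fset=' + setter,
--         'd': 'fdel=' + deleter,
--         'rw': getter + ', ' + setter,
--         'rd': getter + ', fdel=' + deleter,
--         'wd': 'fset=' + setter + ', fdel=' + deleter,
--         'rwd': getter + ', ' + setter + ', ' + deleter,
--     }[pattern]
-- ===== Notes on version B (the rewrite author's own statement) =====
-- stated objective: alternative
-- what changed: Replaces the loop with a stateful positional/keyword flag by a complete 8-entry lookup table: the present-accessor pattern string is computed once and the fully formatted result is read directly from the table, with no per-accessor branching or joining.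
import Mathlib
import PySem

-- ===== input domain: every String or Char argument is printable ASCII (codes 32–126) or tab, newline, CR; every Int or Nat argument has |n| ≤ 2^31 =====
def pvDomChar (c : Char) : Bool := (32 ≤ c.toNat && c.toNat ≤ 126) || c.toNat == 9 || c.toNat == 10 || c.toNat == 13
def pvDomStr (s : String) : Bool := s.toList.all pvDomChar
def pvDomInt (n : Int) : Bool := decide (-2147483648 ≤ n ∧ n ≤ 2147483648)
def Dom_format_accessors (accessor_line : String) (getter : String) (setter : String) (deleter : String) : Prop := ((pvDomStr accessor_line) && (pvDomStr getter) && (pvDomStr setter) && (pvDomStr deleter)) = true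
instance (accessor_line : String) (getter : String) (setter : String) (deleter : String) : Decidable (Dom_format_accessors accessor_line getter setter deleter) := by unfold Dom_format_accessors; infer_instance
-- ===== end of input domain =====

-- B replaces A's flag-carrying loop by a complete 8-entry lookup table keyed by the
-- present-accessor pattern; objective: alternative (table-driven), same cost.

-- ===== PORT A =====
-- literal transliteration: foldl over the three triples carrying (ret, consecutive)
def format_accessors (accessor_line : String) (getter : String) (setter : String) (deleter : String) : String :=
  let st :=
    ([("r", "fget", getter), ("w", "fset", setter), ("d", "fdel", deleter)] :
        List (String × String × String)).foldl
      (fun (st : List String × Bool) t =>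
        if PySem.Str.isIn t.1 accessor_line then
          (st.1 ++ [if st.2 then t.2.2 else t.2.1 ++ "=" ++ t.2.2], st.2)
        else
          (st.1, false))
      ([], true)
  PySem.Str.join ", " st.1

-- ===== PORT B =====
-- transliteration of Source B: pattern string built by filtering 'rwd', then a dict lookup.
-- The pattern is always one of the 8 keys, so Python's d[pattern] never raises;
-- the 'none' arm of the lookup below is unreachable.
def format_accessors_alt (accessor_line : String) (getter : String) (setter : String) (deleter : String) : String :=
  let pattern : String :=
    PySem.Str.join "" ((["r", "w", "d"] : List String).filter
      (fun k => PySem.Str.isIn k accessor_line))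
  let table : PySem.Dict String String := PySem.Dict.ofList
    [("", ""),
     ("r", getter),
     ("w", "fset=" ++ setter),
     ("d", "fdel=" ++ deleter),
     ("rw", getter ++ ", " ++ setter),
     ("rd", getter ++ ", fdel=" ++ deleter),
     ("wd", "fset=" ++ setter ++ ", fdel=" ++ deleter),
     ("rwd", getter ++ ", " ++ setter ++ ", " ++ deleter)]
  match PySem.Dict.get? table pattern with
  | some v => v
  | none => ""

-- ===== PRECONDITION & SPEC =====
def Spec_format_accessors (accessor_line : String) (getter : String) (setter : String) (deleter : String) (out : String) : Prop := out = format_accessors_alt accessor_line getter setter deleter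
instance (accessor_line : String) (getter : String) (setter : String) (deleter : String) (out : String) : Decidable (Spec_format_accessors accessor_line getter setter deleter out) := by unfold Spec_format_accessors; infer_instance

-- ===== CLAIM (what is proved, stated in full; the proofs are below) =====
def Claim_equal_format_accessors : Prop := ∀ (accessor_line : String) (getter : String) (setter : String) (deleter : String), Dom_format_accessors accessor_line getter setter deleter → Spec_format_accessors accessor_line getter setter deleter (format_accessors accessor_line getter setter deleter)

-- ===== LEMMAS AND PROOFS =====

-- the 8 keys are distinct, so building the dict just lays down the literal pair list
set_option maxRecDepth 8000 in
theorem table_ofList_eq (g s d : String) :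
    PySem.Dict.ofList
      [("", ""), ("r", g), ("w", "fset=" ++ s), ("d", "fdel=" ++ d),
       ("rw", g ++ ", " ++ s), ("rd", g ++ ", fdel=" ++ d),
       ("wd", "fset=" ++ s ++ ", fdel=" ++ d), ("rwd", g ++ ", " ++ s ++ ", " ++ d)] =
    PySem.Dict.mk
      [("", ""), ("r", g), ("w", "fset=" ++ s), ("d", "fdel=" ++ d),
       ("rw", g ++ ", " ++ s), ("rd", g ++ ", fdel=" ++ d),
       ("wd", "fset=" ++ s ++ ", fdel=" ++ d), ("rwd", g ++ ", " ++ s ++ ", " ++ d)] := rfl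

-- ===== VERDICT (by name: the statement is the Claim_ definition above) =====
set_option maxRecDepth 8000 in
theorem format_accessors_spec : Claim_equal_format_accessors := by
  intro al g s d _
  unfold Spec_format_accessors format_accessors format_accessors_alt
  have j0 : PySem.Str.join "" ([] : List String) = "" := rfl
  have j1 : PySem.Str.join "" ["r"] = "r" := rfl
  have j2 : PySem.Str.join "" ["w"] = "w" := rfl
  have j3 : PySem.Str.join "" ["d"] = "d" := rfl
  have j4 : PySem.Str.join "" ["r", "w"] = "rw" := rfl
  have j5 : PySem.Str.join "" ["r", "d"] = "rd" := rfl
  have j6 : PySem.Str.join "" ["w", "d"] = "wd" := rfl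
  have j7 : PySem.Str.join "" ["r", "w", "d"] = "rwd" := rfl
  cases hr : PySem.Chars.isIn ['r'] al.toList <;> cases hw : PySem.Chars.isIn ['w'] al.toList <;>
    cases hd : PySem.Chars.isIn ['d'] al.toList <;>
      simp [hr, hw, hd, PySem.Str.isIn, List.foldl, List.filter, j0, j1, j2, j3, j4, j5, j6, j7,
        table_ofList_eq, PySem.Dict.get?_mk_cons, String.ext_iff, PySem.Str.toList_join,
        PySem.Chars.join_cons_cons, PySem.Chars.join_singleton, PySem.Chars.join_nil,
        PySem.Str.join]
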